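-- pv_equiv track=rewrite | github.com/cailleanC1C/C1C-Recruitment | modules/onboarding/watcher_welcome.py | _normalize_clan_math_targets
-- ===== SOURCE A (Python) =====
-- from collections import OrderedDict
--
-- def _normalize_clan_tag_key(tag: str | None) -> str:
--     text = "" if tag is None else str(tag).strip().upper()
--     normalized = "".join(ch for ch in text if ch.isalnum())
--     return normalized
--
-- def _normalize_clan_math_targets(tags: set[str]) -> OrderedDict[str, str]:
--     ordered: "OrderedDict[str, str]" = OrderedDict()
--     for tag in sorted(tags):
--         key = _normalize_clan_tag_key(tag)
--         if not key or key in ordered: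
--             continue
--         ordered[key] = tag
--     return ordered
-- ===== SOURCE B (Python) =====
-- from collections import OrderedDict
--
-- def _normalize_clan_tag_key(tag):
--     text = "" if tag is None else str(tag).strip().upper()
--     return "".join(ch for ch in text if ch.isalnum())
--
-- def _normalize_clan_math_targets(tags):
--     # One pass over the tags in arbitrary order keeping the minimum tag per
--     # normalized key, then sort only the distinct winners by tag value.
--     best = {}
--     for tag in tags:
--         key = _normalize_clan_tag_key(tag)
--         if not key:
--             continue
--         cur = best.get(key)
--         if cur is None or tag < cur:
--             best[key] = tag
--     return OrderedDict(sorted(best.items(), key=lambda kv: kv[1]))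
-- ===== Notes on version B (the rewrite author's own statement) =====
-- stated objective: alternative
-- what changed: Instead of sorting all tags and keeping the first occurrence per normalized key, B scans the tags once in input order keeping the minimum tag per key in a dict, then sorts only the distinct winners by their tag value.
import Mathlib
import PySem

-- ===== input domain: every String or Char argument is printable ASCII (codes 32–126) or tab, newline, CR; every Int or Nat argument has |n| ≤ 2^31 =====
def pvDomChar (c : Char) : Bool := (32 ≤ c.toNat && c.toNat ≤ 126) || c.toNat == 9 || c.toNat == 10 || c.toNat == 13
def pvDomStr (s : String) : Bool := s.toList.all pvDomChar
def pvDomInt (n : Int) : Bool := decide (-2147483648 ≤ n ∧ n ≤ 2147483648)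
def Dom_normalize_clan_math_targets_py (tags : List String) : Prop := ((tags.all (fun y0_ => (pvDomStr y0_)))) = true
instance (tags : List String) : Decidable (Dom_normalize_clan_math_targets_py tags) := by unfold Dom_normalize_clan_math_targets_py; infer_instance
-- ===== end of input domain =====

-- B replaces sort-then-first-occurrence-per-key by a one-pass min-per-key dict whose distinct winners are then sorted by tag value (alternative decomposition, same result).


-- shared module helper _normalize_clan_tag_key (the argument is always a str here, so str(tag) is tag)
def pvNormKey (tag : String) : String :=
  String.ofList (((PySem.Str.upper (PySem.Str.strip tag)).toList).filter (fun ch => PySem.Chars.isalnum ch))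

-- ===== PORT A =====
-- loop body: 'key = _normalize_clan_tag_key(tag); if not key or key in ordered: continue; ordered[key] = tag'
def pvStepA (d : PySem.Dict String String) (tag : String) : PySem.Dict String String :=
  if pvNormKey tag = "" ∨ d.contains (pvNormKey tag) then d else d.insert (pvNormKey tag) tag

def normalize_clan_math_targets_py (tags : List String) : List (String × String) :=
  ((PySem.List.sorted tags (fun x => x) false).foldl pvStepA PySem.Dict.empty).items

-- ===== PORT B =====
-- loop body: 'key = ...; if not key: continue; cur = best.get(key); if cur is None or tag < cur: best[key] = tag'
def pvStepB (d : PySem.Dict String String) (tag : String) : PySem.Dict String String :=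
  if pvNormKey tag = "" then d
  else
    match d.get? (pvNormKey tag) with
    | none => d.insert (pvNormKey tag) tag
    | some cur => if tag < cur then d.insert (pvNormKey tag) tag else d

def normalize_clan_math_targets_py_alt (tags : List String) : List (String × String) :=
  PySem.List.sorted (tags.foldl pvStepB PySem.Dict.empty).items (fun kv => kv.2) false

-- ===== PRECONDITION & SPEC =====
def Spec_normalize_clan_math_targets_py (tags : List String) (out : List (String × String)) : Prop := out = normalize_clan_math_targets_py_alt tags
instance (tags : List String) (out : List (String × String)) : Decidable (Spec_normalize_clan_math_targets_py tags out) := by unfold Spec_normalize_clan_math_targets_py; infer_instance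

-- ===== CLAIM (what is proved, stated in full; the proofs are below) =====
def Claim_equal_normalize_clan_math_targets_py : Prop := ∀ (tags : List String), Dom_normalize_clan_math_targets_py tags → Spec_normalize_clan_math_targets_py tags (normalize_clan_math_targets_py tags)

-- ===== LEMMAS AND PROOFS =====

-- proof-only helpers: the first matching tag, and the running minimum of matching tags
def pvFirst (l : List String) (k : String) : Option String :=
  match l with
  | [] => none
  | t :: ts => if pvNormKey t = k then some t else pvFirst ts k

def pvUpd (acc : Option String) (t : String) : Option String :=
  match acc with
  | none => some t
  | some m => some (if t < m then t else m)

def pvRunMin (l : List String) (k : String) (acc : Option String) : Option String :=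
  match l with
  | [] => acc
  | t :: ts => pvRunMin ts k (if pvNormKey t = k then pvUpd acc t else acc)

-- keys stay nodup through either loop
lemma keysA_nodup (l : List String) (d : PySem.Dict String String) (h : d.keys.Nodup) :
    ((l.foldl pvStepA d).keys).Nodup := by
  induction l generalizing d with
  | nil => exact h
  | cons t ts ih =>
    simp only [List.foldl_cons]
    by_cases hc : pvNormKey t = "" ∨ d.contains (pvNormKey t) = true
    · rw [show pvStepA d t = d from by unfold pvStepA; rw [if_pos hc]]
      exact ih d h
    · rw [show pvStepA d t = d.insert (pvNormKey t) t from by unfold pvStepA; rw [if_neg hc]]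
      exact ih _ (PySem.Dict.nodup_keys_insert _ _ _ h)

lemma keysB_nodup (l : List String) (d : PySem.Dict String String) (h : d.keys.Nodup) :
    ((l.foldl pvStepB d).keys).Nodup := by
  induction l generalizing d with
  | nil => exact h
  | cons t ts ih =>
    simp only [List.foldl_cons]
    by_cases hk : pvNormKey t = ""
    · rw [show pvStepB d t = d from by unfold pvStepB; rw [if_pos hk]]
      exact ih d h
    · cases hg : d.get? (pvNormKey t) with
      | none =>
        rw [show pvStepB d t = d.insert (pvNormKey t) t from by unfold pvStepB; rw [if_neg hk, hg]]
        exact ih _ (PySem.Dict.nodup_keys_insert _ _ _ h)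
      | some cur =>
        by_cases ht : t < cur
        · rw [show pvStepB d t = d.insert (pvNormKey t) t from by
            unfold pvStepB; rw [if_neg hk, hg]; simp only [if_pos ht]]
          exact ih _ (PySem.Dict.nodup_keys_insert _ _ _ h)
        · rw [show pvStepB d t = d from by unfold pvStepB; rw [if_neg hk, hg]; simp only [if_neg ht]]
          exact ih d h

-- the empty key is never inserted
lemma getA_empty_key (l : List String) (d : PySem.Dict String String)
    (h : d.get? "" = none) : (l.foldl pvStepA d).get? "" = none := by
  induction l generalizing d with
  | nil => exact h
  | cons t ts ih =>
    simp only [List.foldl_cons]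
    by_cases hc : pvNormKey t = "" ∨ d.contains (pvNormKey t) = true
    · rw [show pvStepA d t = d from by unfold pvStepA; rw [if_pos hc]]
      exact ih d h
    · rw [show pvStepA d t = d.insert (pvNormKey t) t from by unfold pvStepA; rw [if_neg hc]]
      refine ih _ ?_
      rw [PySem.Dict.get?_insert_of_ne _ _ (fun he => (not_or.mp hc).1 he.symm)]
      exact h

lemma getB_empty_key (l : List String) (d : PySem.Dict String String)
    (h : d.get? "" = none) : (l.foldl pvStepB d).get? "" = none := by
  induction l generalizing d with
  | nil => exact h
  | cons t ts ih =>
    simp only [List.foldl_cons]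
    by_cases hk : pvNormKey t = ""
    · rw [show pvStepB d t = d from by unfold pvStepB; rw [if_pos hk]]
      exact ih d h
    · have hne : ("" : String) ≠ pvNormKey t := fun he => hk he.symm
      cases hg : d.get? (pvNormKey t) with
      | none =>
        rw [show pvStepB d t = d.insert (pvNormKey t) t from by unfold pvStepB; rw [if_neg hk, hg]]
        exact ih _ (by rw [PySem.Dict.get?_insert_of_ne _ _ hne]; exact h)
      | some cur =>
        by_cases ht : t < cur
        · rw [show pvStepB d t = d.insert (pvNormKey t) t from by
            unfold pvStepB; rw [if_neg hk, hg]; simp only [if_pos ht]]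
          exact ih _ (by rw [PySem.Dict.get?_insert_of_ne _ _ hne]; exact h)
        · rw [show pvStepB d t = d from by unfold pvStepB; rw [if_neg hk, hg]; simp only [if_neg ht]]
          exact ih d h

-- A's lookup: existing entries shadow, otherwise the first matching tag
lemma getA_eq (l : List String) (d : PySem.Dict String String) (k : String) (hk : k ≠ "") :
    (l.foldl pvStepA d).get? k = (d.get? k).or (pvFirst l k) := by
  induction l generalizing d with
  | nil => simp only [List.foldl_nil, pvFirst, Option.or_none]
  | cons t ts ih =>
    simp only [List.foldl_cons, pvFirst]
    by_cases hm : pvNormKey t = k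
    · subst hm
      rw [if_pos rfl]
      by_cases hc : d.contains (pvNormKey t) = true
      · rw [show pvStepA d t = d from by unfold pvStepA; rw [if_pos (Or.inr hc)], ih d]
        rw [PySem.Dict.contains_eq_isSome_get?] at hc
        cases hdk : d.get? (pvNormKey t) with
        | none => rw [hdk] at hc; simp at hc
        | some v => rfl
      · have hdk : d.get? (pvNormKey t) = none := by
          rw [PySem.Dict.get?_eq_none_iff_contains]; simpa using hc
        rw [show pvStepA d t = d.insert (pvNormKey t) t from by
          unfold pvStepA; rw [if_neg (not_or.mpr ⟨hk, hc⟩)]]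
        rw [ih, PySem.Dict.get?_insert_self, hdk]
        rfl
    · rw [if_neg hm]
      by_cases hc : pvNormKey t = "" ∨ d.contains (pvNormKey t) = true
      · rw [show pvStepA d t = d from by unfold pvStepA; rw [if_pos hc]]
        exact ih d
      · rw [show pvStepA d t = d.insert (pvNormKey t) t from by unfold pvStepA; rw [if_neg hc]]
        rw [ih, PySem.Dict.get?_insert_of_ne _ _ (fun h => hm h.symm)]

-- B's lookup: the running minimum of the matching tags
lemma getB_eq (l : List String) (d : PySem.Dict String String) (k : String) (hk : k ≠ "") :
    (l.foldl pvStepB d).get? k = pvRunMin l k (d.get? k) := by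
  induction l generalizing d with
  | nil => rfl
  | cons t ts ih =>
    simp only [List.foldl_cons, pvRunMin]
    by_cases hm : pvNormKey t = k
    · subst hm
      rw [if_pos rfl]
      cases hg : d.get? (pvNormKey t) with
      | none =>
        rw [show pvStepB d t = d.insert (pvNormKey t) t from by unfold pvStepB; rw [if_neg hk, hg]]
        rw [ih, PySem.Dict.get?_insert_self]
        rfl
      | some cur =>
        by_cases ht : t < cur
        · rw [show pvStepB d t = d.insert (pvNormKey t) t from by
            unfold pvStepB; rw [if_neg hk, hg]; simp only [if_pos ht]]
          rw [ih, PySem.Dict.get?_insert_self]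
          simp only [pvUpd, if_pos ht]
        · rw [show pvStepB d t = d from by unfold pvStepB; rw [if_neg hk, hg]; simp only [if_neg ht]]
          rw [ih, hg]
          simp only [pvUpd, if_neg ht]
    · rw [if_neg hm]
      by_cases hk0 : pvNormKey t = ""
      · rw [show pvStepB d t = d from by unfold pvStepB; rw [if_pos hk0]]
        exact ih d
      · cases hg : d.get? (pvNormKey t) with
        | none =>
          rw [show pvStepB d t = d.insert (pvNormKey t) t from by unfold pvStepB; rw [if_neg hk0, hg]]
          rw [ih, PySem.Dict.get?_insert_of_ne _ _ (fun h => hm h.symm)]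
        | some cur =>
          by_cases ht : t < cur
          · rw [show pvStepB d t = d.insert (pvNormKey t) t from by
              unfold pvStepB; rw [if_neg hk0, hg]; simp only [if_pos ht]]
            rw [ih, PySem.Dict.get?_insert_of_ne _ _ (fun h => hm h.symm)]
          · rw [show pvStepB d t = d from by unfold pvStepB; rw [if_neg hk0, hg]; simp only [if_neg ht]]
            exact ih d

-- bridge the proof helpers to filters of the matching tags
lemma pvFirst_eq_filter_head? (l : List String) (k : String) :
    pvFirst l k = (l.filter (fun t => decide (pvNormKey t = k))).head? := by
  induction l with
  | nil => rfl
  | cons t ts ih =>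
    simp only [pvFirst, List.filter_cons]
    by_cases hm : pvNormKey t = k
    · simp [hm]
    · simp [hm, ih]

lemma pvRunMin_eq_filter_foldl (l : List String) (k : String) (acc : Option String) :
    pvRunMin l k acc = (l.filter (fun t => decide (pvNormKey t = k))).foldl pvUpd acc := by
  induction l generalizing acc with
  | nil => rfl
  | cons t ts ih =>
    by_cases hm : pvNormKey t = k
    · simp [pvRunMin, hm, ih]
    · simp [pvRunMin, hm, ih]

-- the running minimum over a nonempty list is THE minimum value
lemma foldl_pvUpd_some (rest : List String) : ∀ a, rest.foldl pvUpd (some a) = some (rest.foldl min a) := by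
  induction rest with
  | nil => intro a; rfl
  | cons b bs ih =>
    intro a
    simp only [List.foldl_cons]
    have hu : pvUpd (some a) b = some (min a b) := by
      simp only [pvUpd]
      rcases lt_or_ge b a with h | h
      · rw [if_pos h, min_eq_right h.le]
      · rw [if_neg (not_lt.mpr h), min_eq_left h]
    rw [hu, ih]

lemma foldl_pvUpd_cons (a : String) (rest : List String) :
    (a :: rest).foldl pvUpd none = some (rest.foldl min a) := by
  simp only [List.foldl_cons]
  exact foldl_pvUpd_some rest a

-- both dicts agree on every key
lemma get_agree (tags : List String) (k : String) :
    ((PySem.List.sorted tags (fun x => x) false).foldl pvStepA PySem.Dict.empty).get? k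
      = (tags.foldl pvStepB PySem.Dict.empty).get? k := by
  by_cases hk : k = ""
  · subst hk
    rw [getA_empty_key _ _ (PySem.Dict.get?_empty _), getB_empty_key _ _ (PySem.Dict.get?_empty _)]
  · rw [getA_eq _ _ _ hk, getB_eq _ _ _ hk, PySem.Dict.get?_empty, Option.none_or]
    rw [pvFirst_eq_filter_head?, pvRunMin_eq_filter_foldl]
    set p : String → Bool := fun t => decide (pvNormKey t = k) with hp
    have hperm : ((PySem.List.sorted tags (fun x => x) false).filter p).Perm (tags.filter p) :=
      (PySem.List.sorted_perm tags (fun x => x) false).filter p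
    have hpw : ((PySem.List.sorted tags (fun x => x) false).filter p).Pairwise (· ≤ ·) :=
      List.Pairwise.filter p (PySem.List.sorted_pairwise tags (fun x => x))
    cases hA : (PySem.List.sorted tags (fun x => x) false).filter p with
    | nil =>
      rw [hA] at hperm
      rw [← hperm.nil_eq]
      rfl
    | cons a rest =>
      rw [hA] at hperm hpw
      have hmin_a : ∀ y ∈ tags.filter p, a ≤ y := by
        intro y hy
        have : y ∈ a :: rest := hperm.symm.subset hy
        rcases List.mem_cons.mp this with h | h
        · rw [h]
        · exact (List.pairwise_cons.mp hpw).1 y h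
      cases hB : tags.filter p with
      | nil => rw [hB] at hperm; exact absurd hperm.symm.nil_eq (by simp)
      | cons b r =>
        rw [foldl_pvUpd_cons]
        have hx_mem : r.foldl min b ∈ b :: r := by
          rcases PySem.List.foldl_min_mem r b with h | h
          · rw [h]; exact List.mem_cons_self
          · exact List.mem_cons_of_mem _ h
        have hx_min : ∀ y ∈ b :: r, r.foldl min b ≤ y := by
          intro y hy
          rcases List.mem_cons.mp hy with h | h
          · rw [h]; exact (PySem.List.foldl_min_le r b).1
          · exact (PySem.List.foldl_min_le r b).2 y h
        have ha_mem : a ∈ b :: r := by rw [← hB]; exact hperm.subset List.mem_cons_self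
        have hle1 : a ≤ r.foldl min b := hmin_a _ (by rw [hB]; exact hx_mem)
        have hle2 : r.foldl min b ≤ a := hx_min a ha_mem
        simp [le_antisymm hle1 hle2]

-- dicts with nodup keys and equal lookups have permuted item lists
lemma items_perm {d1 d2 : PySem.Dict String String} (h1 : d1.keys.Nodup) (h2 : d2.keys.Nodup)
    (h : ∀ k, d1.get? k = d2.get? k) : d1.items.Perm d2.items := by
  have hn1 : d1.items.Nodup := List.Nodup.of_map _ (by simpa only [PySem.Dict.keys] using h1)
  have hn2 : d2.items.Nodup := List.Nodup.of_map _ (by simpa only [PySem.Dict.keys] using h2)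
  rw [List.perm_ext_iff_of_nodup hn1 hn2]
  rintro ⟨k, v⟩
  rw [← PySem.Dict.get?_eq_some_iff_mem_items _ _ _ h1, ← PySem.Dict.get?_eq_some_iff_mem_items _ _ _ h2, h k]

-- A's items carry strictly increasing tag values
lemma A_pairwise_aux (l : List String) (d : PySem.Dict String String)
    (hl : l.Pairwise (· ≤ ·))
    (hkey : ∀ p ∈ d.items, p.1 = pvNormKey p.2)
    (hlt : ∀ p ∈ d.items, ∀ t ∈ l, p.2 ≤ t)
    (hpw : d.items.Pairwise (fun a b => a.2 < b.2)) :
    ((l.foldl pvStepA d).items).Pairwise (fun a b => a.2 < b.2) := by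
  induction l generalizing d with
  | nil => exact hpw
  | cons t ts ih =>
    obtain ⟨hhead, hts⟩ := List.pairwise_cons.mp hl
    simp only [List.foldl_cons]
    by_cases hc : pvNormKey t = "" ∨ d.contains (pvNormKey t) = true
    · rw [show pvStepA d t = d from by unfold pvStepA; rw [if_pos hc]]
      exact ih d hts hkey (fun p hp u hu => hlt p hp u (List.mem_cons_of_mem _ hu)) hpw
    · rw [show pvStepA d t = d.insert (pvNormKey t) t from by unfold pvStepA; rw [if_neg hc]]
      have hcf : d.contains (pvNormKey t) = false := by simpa using (not_or.mp hc).2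
      have hitems : (d.insert (pvNormKey t) t).items = d.items ++ [(pvNormKey t, t)] :=
        PySem.Dict.items_insert_of_not_contains d t hcf
      apply ih _ hts
      · intro p hp
        rw [hitems] at hp
        rcases List.mem_append.mp hp with h | h
        · exact hkey p h
        · simp only [List.mem_singleton] at h
          rw [h]
      · intro p hp u hu
        rw [hitems] at hp
        rcases List.mem_append.mp hp with h | h
        · exact hlt p h u (List.mem_cons_of_mem _ hu)
        · simp only [List.mem_singleton] at h
          rw [h]
          exact hhead u hu
      · rw [hitems]
        rw [List.pairwise_append]
        refine ⟨hpw, List.pairwise_singleton _ _, ?_⟩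
        intro p hp q hq
        simp only [List.mem_singleton] at hq
        subst hq
        have hle : p.2 ≤ t := hlt p hp t List.mem_cons_self
        refine lt_of_le_of_ne hle (fun he => ?_)
        have : p.1 = pvNormKey t := by rw [hkey p hp, he]
        have hmem : pvNormKey t ∈ d.keys := this ▸ PySem.Dict.mem_keys_of_mem_items d hp
        rw [← PySem.Dict.contains_iff_mem_keys] at hmem
        rw [hmem] at hcf
        exact Bool.true_eq_false.mp hcf

lemma A_pairwise (tags : List String) :
    (((PySem.List.sorted tags (fun x => x) false).foldl pvStepA PySem.Dict.empty).items).Pairwise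
      (fun a b => a.2 < b.2) := by
  apply A_pairwise_aux
  · simpa using PySem.List.sorted_pairwise tags (fun x => x)
  · intro p hp; simp [PySem.Dict.empty] at hp
  · intro p hp; simp [PySem.Dict.empty] at hp
  · simp [PySem.Dict.empty]

-- ===== VERDICT (by name: the statement is the Claim_ definition above) =====
theorem normalize_clan_math_targets_py_spec : Claim_equal_normalize_clan_math_targets_py := by
  intro tags _
  unfold Spec_normalize_clan_math_targets_py normalize_clan_math_targets_py normalize_clan_math_targets_py_alt
  have hperm := items_perm
    (keysA_nodup _ PySem.Dict.empty (by simp [PySem.Dict.empty, PySem.Dict.keys]))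
    (keysB_nodup _ PySem.Dict.empty (by simp [PySem.Dict.empty, PySem.Dict.keys]))
    (get_agree tags)
  exact (PySem.List.sorted_eq_of_perm_of_pairwise_lt _ _ (fun kv => kv.2) hperm (A_pairwise tags)).symm
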